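-- pv_equiv track=rewrite | github.com/bturos/advent-of-code-2023 | python/day3/day3.py | collectTokensInLine
-- ===== SOURCE A (Python) =====
-- def collectTokensInLine(line: str):
--   tokenIndices: list[list[int]] = []
--   currentTokenIndices: list[int] = []
--
--   for index, character in enumerate(line):
--     isDigit = character.isdecimal()
--     isEngineSymbol = character != '.'
--
--     if len(currentTokenIndices) == 0:
--       if isDigit:
--         currentTokenIndices.append(index)
--       elif isEngineSymbol:
--         tokenIndices.append([index])
--     else:
--       if isDigit:
--         currentTokenIndices.append(index)
--       else:
--         tokenIndices.append(currentTokenIndices.copy())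
--         currentTokenIndices.clear()
--         if isEngineSymbol:
--           tokenIndices.append([index])
--
--   if len(currentTokenIndices) > 0:
--     tokenIndices.append(currentTokenIndices)
--
--   return tokenIndices
-- ===== SOURCE B (Python) =====
-- def collectTokensInLine(line: str):
--   # Index-jumping scan: consume each digit run in one inner step, emit its
--   # index range at once; single symbols emit [i]; '.' is skipped.
--   result = []
--   i = 0
--   n = len(line)
--   while i < n:
--     c = line[i]
--     if c.isdecimal():
--       j = i + 1
--       while j < n and line[j].isdecimal():
--         j += 1
--       result.append(list(range(i, j)))
--       i = j
--     elif c != '.':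
--       result.append([i])
--       i += 1
--     else:
--       i += 1
--   return result
-- ===== Notes on version B (the rewrite author's own statement) =====
-- stated objective: alternative
-- what changed: Replaces A's character-at-a-time state machine (a pending-digit accumulator list flushed on each non-digit and at the end) with an index-jumping scan that consumes each whole digit run in one inner step and emits its index range at once; no pending-token state or end-of-loop flush.
import Mathlib
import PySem

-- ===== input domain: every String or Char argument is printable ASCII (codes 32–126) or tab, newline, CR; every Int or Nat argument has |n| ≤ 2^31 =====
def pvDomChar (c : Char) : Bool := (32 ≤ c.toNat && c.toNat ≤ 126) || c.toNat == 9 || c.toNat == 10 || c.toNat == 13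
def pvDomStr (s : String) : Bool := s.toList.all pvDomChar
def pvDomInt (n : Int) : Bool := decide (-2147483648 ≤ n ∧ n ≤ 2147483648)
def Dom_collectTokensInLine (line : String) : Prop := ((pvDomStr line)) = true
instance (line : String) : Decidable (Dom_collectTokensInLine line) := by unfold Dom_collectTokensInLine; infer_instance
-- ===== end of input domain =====

-- B replaces A's pending-accumulator state machine by an index-jumping scan that
-- consumes each digit run in one step (objective: alternative, same cost).

-- ===== PORT A =====
-- the for-loop over enumerate(line), carrying (tokenIndices, currentTokenIndices);
-- the end-of-loop flush is the [] case.  isdecimal = PySem.Chars.isdigit (exact on ASCII Dom).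
def pvAGo (i : Int) (cs : List Char) (acc : List (List Int)) (cur : List Int) : List (List Int) :=
  match cs with
  | [] => if cur.length > 0 then acc ++ [cur] else acc
  | c :: rest =>
    let isDigit := PySem.Chars.isdigit c
    let isEngineSymbol := c != '.'
    if cur.length = 0 then
      if isDigit then pvAGo (i+1) rest acc (cur ++ [i])
      else if isEngineSymbol then pvAGo (i+1) rest (acc ++ [[i]]) cur
      else pvAGo (i+1) rest acc cur
    else
      if isDigit then pvAGo (i+1) rest acc (cur ++ [i])
      else
        let acc' := acc ++ [cur]
        let acc'' := if isEngineSymbol then acc' ++ [[i]] else acc'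
        pvAGo (i+1) rest acc'' []

def collectTokensInLine (line : String) : List (List Int) :=
  pvAGo 0 line.toList [] []

-- ===== PORT B =====
-- the outer while-loop; the inner 'while j < n and line[j].isdecimal()' scan is the
-- takeWhile/dropWhile of the remaining characters; list(range(i, j)) = pyRange i j 1.
def pvBGo (i : Int) (cs : List Char) : List (List Int) :=
  match cs with
  | [] => []
  | c :: rest =>
    if PySem.Chars.isdigit c then
      let j := i + 1 + (rest.takeWhile PySem.Chars.isdigit).length
      PySem.List.pyRange i j 1 :: pvBGo j (rest.dropWhile PySem.Chars.isdigit)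
    else if c != '.' then [i] :: pvBGo (i+1) rest
    else pvBGo (i+1) rest
termination_by cs.length
decreasing_by
  · simpa using Nat.lt_succ_of_le (List.length_dropWhile_le _ _)
  · simp
  · simp

def collectTokensInLine_alt (line : String) : List (List Int) :=
  pvBGo 0 line.toList

-- ===== PRECONDITION & SPEC =====
def Spec_collectTokensInLine (line : String) (out : List (List Int)) : Prop := out = collectTokensInLine_alt line
instance (line : String) (out : List (List Int)) : Decidable (Spec_collectTokensInLine line out) := by unfold Spec_collectTokensInLine; infer_instance

-- ===== CLAIM (what is proved, stated in full; the proofs are below) =====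
def Claim_equal_collectTokensInLine : Prop := ∀ (line : String), Dom_collectTokensInLine line → Spec_collectTokensInLine line (collectTokensInLine line)

-- ===== LEMMAS AND PROOFS =====

-- A's loop only ever appends to tokenIndices: the accumulator factors out.
lemma pvAGo_acc (cs : List Char) : ∀ (i : Int) (acc : List (List Int)) (cur : List Int),
    pvAGo i cs acc cur = acc ++ pvAGo i cs [] cur := by
  induction cs with
  | nil => intro i acc cur; simp only [pvAGo]; split <;> simp
  | cons c rest ih =>
    intro i acc cur
    simp only [pvAGo, List.nil_append]
    split_ifs with h1 h2 h3 h4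
    · exact ih (i+1) acc (cur ++ [i])
    · rw [ih (i+1) (acc ++ [[i]]) cur, ih (i+1) [[i]] cur]; simp
    · exact ih (i+1) acc cur
    · exact ih (i+1) acc (cur ++ [i])
    · rw [ih (i+1) (acc ++ [cur] ++ [[i]]) [], ih (i+1) ([cur] ++ [[i]]) []]; simp
    · rw [ih (i+1) (acc ++ [cur]) [], ih (i+1) [cur] []]; simp

-- joint invariant: with empty pending state A's loop equals B's scan, and with a
-- nonempty pending digit token `cur` it first extends `cur` through the current
-- digit run and then continues like B.
lemma pvAGo_eq_pvBGo (cs : List Char) : ∀ (i : Int),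
    (pvAGo i cs [] [] = pvBGo i cs) ∧
    (∀ cur : List Int, cur ≠ [] →
      pvAGo i cs [] cur =
        (cur ++ PySem.List.pyRange i (i + (cs.takeWhile PySem.Chars.isdigit).length) 1)
          :: pvBGo (i + (cs.takeWhile PySem.Chars.isdigit).length) (cs.dropWhile PySem.Chars.isdigit)) := by
  induction cs with
  | nil =>
    intro i
    refine ⟨by simp [pvAGo, pvBGo], ?_⟩
    intro cur hcur
    have h0 : PySem.List.pyRange i (i + ((0:Nat):Int)) 1 = [] :=
      PySem.List.pyRange_one_eq_nil (by omega)
    simp [pvAGo, pvBGo, List.length_pos_iff, hcur]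
  | cons c rest ih =>
    intro i
    by_cases hd : PySem.Chars.isdigit c = true
    · -- digit character: A pushes i onto cur; B consumes the whole run
      have hlt : i < i + 1 + ((rest.takeWhile PySem.Chars.isdigit).length : Int) := by omega
      have key : ∀ cur : List Int,
          pvAGo (i+1) rest [] (cur ++ [i]) =
            (cur ++ PySem.List.pyRange i (i + 1 + ((rest.takeWhile PySem.Chars.isdigit).length : Int)) 1)
              :: pvBGo (i + 1 + ((rest.takeWhile PySem.Chars.isdigit).length : Int))
                  (rest.dropWhile PySem.Chars.isdigit) := by
        intro cur
        rw [(ih (i+1)).2 (cur ++ [i]) (by simp), PySem.List.pyRange_one_cons hlt]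
        simp
      have htw : (c :: rest).takeWhile PySem.Chars.isdigit
          = c :: rest.takeWhile PySem.Chars.isdigit := by simp [hd]
      have hdw : (c :: rest).dropWhile PySem.Chars.isdigit
          = rest.dropWhile PySem.Chars.isdigit := by simp [hd]
      have harith : i + (((c :: rest).takeWhile PySem.Chars.isdigit).length : Int)
          = i + 1 + ((rest.takeWhile PySem.Chars.isdigit).length : Int) := by
        rw [htw, List.length_cons]; push_cast; ring
      constructor
      · rw [pvAGo, pvBGo]
        simp only [hd, List.length_nil, if_pos, List.nil_append]
        have := key []
        simp only [List.nil_append] at this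
        exact this
      · intro cur hcur
        have hlen : ¬ cur.length = 0 := by simpa [List.length_eq_zero_iff] using hcur
        rw [pvAGo]
        simp only [hd, hlen, if_false, if_pos]
        rw [harith, hdw]
        exact key cur
    · -- non-digit character
      have htw : (c :: rest).takeWhile PySem.Chars.isdigit = [] := by simp [hd]
      have hdw : (c :: rest).dropWhile PySem.Chars.isdigit = c :: rest := by simp [hd]
      have hE : pvAGo i (c :: rest) [] [] = pvBGo i (c :: rest) := by
        rw [pvAGo, pvBGo]
        simp only [hd, List.length_nil, Bool.false_eq_true, if_false, if_pos]
        by_cases hs : (c != '.') = true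
        · simp only [hs, if_true, List.nil_append]
          rw [pvAGo_acc, (ih (i+1)).1]
          rfl
        · simp only [hs, Bool.false_eq_true, if_false]
          exact (ih (i+1)).1
      refine ⟨hE, ?_⟩
      intro cur hcur
      have hlen : ¬ cur.length = 0 := by simpa [List.length_eq_zero_iff] using hcur
      rw [pvAGo]
      simp only [hd, hlen, Bool.false_eq_true, if_false]
      rw [htw, hdw, pvBGo]
      simp only [hd, Bool.false_eq_true, if_false, List.length_nil, Nat.cast_zero, add_zero]
      by_cases hs : (c != '.') = true
      · simp only [hs, if_true]
        rw [pvAGo_acc, (ih (i+1)).1]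
        simp
      · simp only [hs, Bool.false_eq_true, if_false]
        rw [pvAGo_acc, (ih (i+1)).1]
        simp

-- ===== VERDICT (by name: the statement is the Claim_ definition above) =====
theorem collectTokensInLine_spec : Claim_equal_collectTokensInLine := by
  intro line _
  show collectTokensInLine line = collectTokensInLine_alt line
  unfold collectTokensInLine collectTokensInLine_alt
  exact (pvAGo_eq_pvBGo line.toList 0).1
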